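-- pv_equiv track=rewrite | github.com/AlixPa/AtCoder-fafbaui | base_code/list/dichoto.py | dichoSearch
-- ===== SOURCE A (Python) =====
-- def dichoSearch(k, ls):
--   '''
--   Take a sorted listed and an item, return the indice of the greater smaller int of the item (-1 if the item is smaller than all)
--   (3, [1, 4, 7]) => 0
--   (5, [0, 1, 2, 3, 10]) => 3
--   '''
--   #ls.sort()
--   if len(ls) == 0:
--     return -1
--   if k < ls[0]:
--     return -1
--   left = 0
--   right = len(ls) - 1
--   while True:
--     dif = right - left
--     if dif == 0:
--       return left
--     center = left + (dif+1)//2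
--     if ls[center] <= k:
--       left = center
--     else:
--       right = center - 1
-- ===== SOURCE B (Python) =====
-- def dichoSearch(k, ls):
--   '''Index of the last element <= k in a sorted list (-1 if none):
--   in a non-decreasing list that index is (number of elements <= k) - 1,
--   so one counting pass replaces A's binary search.'''
--   return sum(1 for x in ls if x <= k) - 1
-- ===== Notes on version B (the rewrite author's own statement) =====
-- stated objective: simpler
-- what changed: Replaced the binary search over (left, right) by a single counting pass: on a sorted list the index of the last element <= k equals (count of elements <= k) - 1.
-- outside the precondition, e.g. on dichoSearch(3, [5, 1]): A returns -1, B returns 0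
import Mathlib
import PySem

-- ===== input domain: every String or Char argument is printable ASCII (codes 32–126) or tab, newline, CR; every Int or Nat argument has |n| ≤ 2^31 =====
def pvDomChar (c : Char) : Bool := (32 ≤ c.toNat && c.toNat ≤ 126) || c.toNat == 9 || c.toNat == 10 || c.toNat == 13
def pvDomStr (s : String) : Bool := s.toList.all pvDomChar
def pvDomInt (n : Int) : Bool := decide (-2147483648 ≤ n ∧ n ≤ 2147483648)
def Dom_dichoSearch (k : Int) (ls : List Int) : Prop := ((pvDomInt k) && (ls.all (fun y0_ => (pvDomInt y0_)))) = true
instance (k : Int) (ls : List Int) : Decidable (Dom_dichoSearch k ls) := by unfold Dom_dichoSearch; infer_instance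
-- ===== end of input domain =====

-- B replaces the binary search by one counting pass; on sorted input (Pre_, as A's docstring
-- requires) the last index with ls[i] <= k is the count of elements <= k, minus 1.

-- ===== PORT A =====
-- A's 'while True' loop; the 'dif ≤ 0' guard (Python tests 'dif == 0'; dif < 0 never
-- occurs from the entry call) and the 'none' index branch (unreachable IndexError) only
-- make the recursion total.
def dichoLoopA (k : Int) (ls : List Int) (left right : Int) : Int :=
  let dif := right - left
  if _h : dif ≤ 0 then left
  else
    let center := left + PySem.Int.floordiv (dif + 1) 2
    match PySem.List.pyGet? ls center with
    | none => left
    | some v =>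
      if v ≤ k then dichoLoopA k ls center right
      else dichoLoopA k ls left (center - 1)
termination_by (right - left).toNat
decreasing_by
  · have := PySem.Int.floordiv_eq_ediv_of_pos (a := right - left + 1) (b := 2) (by omega)
    omega
  · have := PySem.Int.floordiv_eq_ediv_of_pos (a := right - left + 1) (b := 2) (by omega)
    omega

def dichoSearch (k : Int) (ls : List Int) : Int :=
  if ls.length = 0 then -1
  else
    match PySem.List.pyGet? ls 0 with
    | none => -1   -- unreachable: ls is nonempty
    | some h0 =>
      if k < h0 then -1
      else dichoLoopA k ls 0 (ls.length - 1)

-- ===== PORT B =====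
def dichoSearch_alt (k : Int) (ls : List Int) : Int :=
  (ls.foldl (fun acc x => if x ≤ k then acc + 1 else acc) (0 : Int)) - 1

-- ===== PRECONDITION & SPEC =====
-- Pre_: the elements ≤ k occupy a PREFIX of the positions — the exact shape A's docstring
-- ('take a sorted list') promises and binary search needs; it holds for every sorted list
-- (and many more). On other inputs A's probe path returns an accidental value no caller
-- could specify (both A's and B's answers are equally defensible there).
def Pre_dichoSearch (k : Int) (ls : List Int) : Prop := List.Pairwise (fun a b => b ≤ k → a ≤ k) ls
instance (k : Int) (ls : List Int) : Decidable (Pre_dichoSearch k ls) := by unfold Pre_dichoSearch; infer_instance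
def pvWitness_dichoSearch : Int × List Int := (5, [0, 1, 2, 3, 10])

def Spec_dichoSearch (k : Int) (ls : List Int) (out : Int) : Prop := out = dichoSearch_alt k ls
instance (k : Int) (ls : List Int) (out : Int) : Decidable (Spec_dichoSearch k ls out) := by unfold Spec_dichoSearch; infer_instance

-- ===== CLAIM (what is proved, stated in full; the proofs are below) =====
def Claim_equal_dichoSearch : Prop := ∀ (k : Int) (ls : List Int), Dom_dichoSearch k ls → Pre_dichoSearch k ls → Spec_dichoSearch k ls (dichoSearch k ls)

-- ===== LEMMAS AND PROOFS =====

-- B's fold is List.countP.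
theorem foldl_count_le (k : Int) (ls : List Int) :
    ls.foldl (fun acc x => if x ≤ k then acc + 1 else acc) (0 : Int)
      = (ls.countP (fun x => x ≤ k) : Int) := by
  simpa using PySem.List.foldl_count_if (fun x => decide (x ≤ k)) ls 0

-- counting characterisation: if the elements ≤ k are exactly those at indices < m, countP = m
theorem countP_eq_of_cut (k : Int) (ls : List Int) (m : Nat) (hm : m ≤ ls.length)
    (h : ∀ j (hj : j < ls.length), ls[j] ≤ k ↔ j < m) :
    ls.countP (fun x => x ≤ k) = m := by
  have hsplit : ls.countP (fun x => x ≤ k)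
      = (ls.take m).countP (fun x => x ≤ k) + (ls.drop m).countP (fun x => x ≤ k) := by
    rw [← List.countP_append, List.take_append_drop]
  have htake : (ls.take m).countP (fun x => x ≤ k) = m := by
    have hlen : (ls.take m).length = m := by simp [hm]
    have hall : ∀ a ∈ ls.take m, decide (a ≤ k) = true := by
      intro a ha
      rcases List.mem_iff_getElem.mp ha with ⟨j, hj, rfl⟩
      have hjm : j < m := by omega
      have hjl : j < ls.length := by omega
      simp only [List.getElem_take]
      exact decide_eq_true ((h j hjl).mpr hjm)
    have := List.countP_eq_length.mpr hall
    simpa [hlen] using this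
  have hdrop : (ls.drop m).countP (fun x => x ≤ k) = 0 := by
    rw [List.countP_eq_zero]
    intro a ha
    rcases List.mem_iff_getElem.mp ha with ⟨j, hj, rfl⟩
    have hjl : m + j < ls.length := by simp at hj; omega
    simp only [List.getElem_drop]
    have : ¬ ls[m + j] ≤ k := fun hle => by have := (h (m + j) hjl).mp hle; omega
    simpa using this
  omega

-- the loop invariant: window [l, r], ls[l] ≤ k, everything right of r is > k
theorem dichoLoopA_eq_countP (k : Int) (ls : List Int)
    (hs : List.Pairwise (fun a b => b ≤ k → a ≤ k) ls) (l r : Nat)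
    (hr : r < ls.length) (hlr : l ≤ r)
    (hl : ls[l]'(by omega) ≤ k)
    (hright : ∀ j (hj : j < ls.length), r < j → k < ls[j]) :
    dichoLoopA k ls (l : Int) (r : Int) = (ls.countP (fun x => x ≤ k) : Int) - 1 := by
  have hclosed : ∀ i j (hi : i < ls.length) (hj : j < ls.length), i ≤ j →
      ls[j] ≤ k → ls[i] ≤ k := by
    intro i j hi hj hij hjk
    rcases Nat.lt_or_ge i j with hlt | hge
    · exact List.pairwise_iff_getElem.mp hs i j hi hj hlt hjk
    · have : i = j := by omega
      subst this; exact hjk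
  generalize hn : r - l = n
  induction n using Nat.strong_induction_on generalizing l r with
  | _ n ih =>
    rw [dichoLoopA]
    by_cases heq : l = r
    · subst heq
      have hz : (l : Int) - (l : Int) ≤ 0 := by omega
      simp only [hz, dite_true]
      have hcut : ls.countP (fun x => x ≤ k) = l + 1 := by
        apply countP_eq_of_cut k ls (l + 1) (by omega)
        intro j hj
        constructor
        · intro hle
          by_contra hc
          have := hright j hj (by omega)
          omega
        · intro hjm
          exact hclosed j l hj (by omega) (by omega) hl
      rw [hcut]; push_cast; ring
    · -- l < r
      have hlt : l < r := by omega
      have hd : ¬ ((r : Int) - (l : Int) ≤ 0) := by omega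
      simp only [hd, dite_false]
      set d : Nat := r - l with hddef
      have hcast1 : (r : Int) - (l : Int) + 1 = ((d + 1 : Nat) : Int) := by push_cast; omega
      set h : Nat := (d + 1) / 2 with hhdef
      have hfd : PySem.Int.floordiv ((r : Int) - (l : Int) + 1) 2 = (h : Int) := by
        rw [hcast1]
        exact_mod_cast PySem.Int.floordiv_natCast (d + 1) 2
      have h1 : 1 ≤ h := by omega
      have hhd : h ≤ d := by omega
      have hcenter : (l : Int) + PySem.Int.floordiv ((r : Int) - (l : Int) + 1) 2
          = ((l + h : Nat) : Int) := by rw [hfd]; push_cast; ring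
      have hlh : l + h < ls.length := by omega
      have hget : PySem.List.pyGet? ls ((l + h : Nat) : Int) = some (ls[l + h]'hlh) := by
        rw [PySem.List.pyGet?_natCast]
        exact List.getElem?_eq_getElem hlh
      rw [hcenter, hget]
      by_cases hv : ls[l + h]'hlh ≤ k
      · simp only [hv, if_true]
        have := ih (r - (l + h)) (by omega) (l + h) r hr (by omega) hv hright rfl
        simpa using this
      · simp only [hv, if_false]
        have hright' : ∀ j (hj : j < ls.length), l + h - 1 < j → k < ls[j] := by
          intro j hj hjgt
          by_contra hc
          exact hv (hclosed (l + h) j hlh hj (by omega) (by omega))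
        have hl' : ls[l]'(by omega) ≤ k := hl
        have := ih (l + h - 1 - l) (by omega) l (l + h - 1) (by omega) (by omega) hl' hright' rfl
        have hcast2 : ((l + h : Nat) : Int) - 1 = ((l + h - 1 : Nat) : Int) := by push_cast; omega
        rw [hcast2]
        exact this

-- ===== VERDICT (by name: the statement is the Claim_ definition above) =====
theorem dichoSearch_spec : Claim_equal_dichoSearch := by
  intro k ls _ hs
  unfold Spec_dichoSearch dichoSearch dichoSearch_alt
  rw [foldl_count_le]
  cases ls with
  | nil => simp
  | cons h0 t =>
    simp only [List.length_cons]
    have hget : PySem.List.pyGet? (h0 :: t) 0 = some h0 := by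
      simp [PySem.List.pyGet?, PySem.List.pyIdx?]
    rw [hget]
    by_cases hk : k < h0
    · -- every element is ≥ h0 > k, so the count is 0
      have hcnt : (h0 :: t).countP (fun x => x ≤ k) = 0 := by
        rw [List.countP_eq_zero]
        intro a ha
        rcases List.mem_iff_getElem.mp ha with ⟨j, hj, rfl⟩
        have hnot : ¬ (h0 :: t)[j] ≤ k := by
          intro hle
          have h0k : h0 ≤ k := by
            rcases Nat.eq_zero_or_pos j with hj0 | hj0
            · subst hj0; simpa using hle
            · have := List.pairwise_iff_getElem.mp hs 0 j (by simp) hj hj0 hle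
              simpa using this
          omega
        simpa using hnot
      simp [hk, hcnt]
    · have := dichoLoopA_eq_countP k (h0 :: t) hs 0 t.length
        (by simp) (by omega) (by simpa using not_lt.mp hk)
        (by intro j hj hj2; simp at hj; omega)
      simp only [hk, if_false]
      have hc : ((t.length + 1 : Nat) : Int) - 1 = (t.length : Int) := by push_cast; ring
      rw [hc]
      simpa using this
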